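-- pv_equiv track=rewrite | github.com/rexemin/CAMEN | src/metodos_numericos/sel/operacion.py | verificarDominanciaDiagonal
-- ===== SOURCE A (Python) =====
-- def repeticionLista (lista):
--     for i in range(0, len(lista)):
--         for j in range(i + 1, len(lista)):
--             if lista[i] == lista[j]:
--                 return True
--
--     return False
--
-- def sumatoriaRenglon (matriz, i, indice_saltado):
--     sumatoria = 0
--
--     for j in range(0, indice_saltado):
--         sumatoria = sumatoria + abs(matriz[i][j])
--
--     for j in range(indice_saltado + 1, len(matriz[i])):
--         sumatoria = sumatoria + abs(matriz[i][j])
--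
--     return sumatoria
--
-- def verificarDominanciaDiagonal (matriz, terminos_independientes):
--     #Inicializa la lista de posiciones de los renglones de la matriz original.
--     posiciones = [-1 for renglon in matriz]
--
--     """
--     El siguiente bloque revisa que entrada del renglón es dominante sobre el resto.
--     Una vez que lo encuentra, guarda en la lista de posiciones el lugar donde debe
--     posicionarse para que quede en la diagonal.
--     El proceso se repite para cada renglón.
--     """
--     for i in range(0, len(matriz)):
--         for j in range(0, len(matriz[i])):
--             if abs(matriz[i][j]) > sumatoriaRenglon(matriz, i, j):
--                 posiciones[i] = j
--
--         #Si de ninguna manera se puede obtener un lugar en la diagonal que cumpla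
--         #con la condición de convergencia.
--         if posiciones[i] == -1:
--             return False
--
--     #Si hay valores repetidos, no se puede formar una matriz diagonalmente dominante.
--     if (repeticionLista(posiciones)):
--         return False
--     else:
--         matriz_auxiliar = copiarMatriz(matriz)
--         b_auxiliar = copiarMatriz(terminos_independientes)
--
--         #Reacomoda la matriz original con todos los cambios de renglón necesarios.
--         for i in range(0, len(posiciones)):
--             for j in range(0, len(matriz[i])):
--                 matriz[posiciones[i]][j] = matriz_auxiliar[i][j]
--             terminos_independientes[posiciones[i]][0] = b_auxiliar[i][0]
--
--     return True
--
-- def copiarMatriz (matriz):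
--     copia = [renglon[:] for renglon in matriz]
--
--     return copia
-- ===== SOURCE B (Python) =====
-- def verificarDominanciaDiagonal(matriz, terminos_independientes):
--     # One pass per row: precompute the row's absolute total once; an entry is
--     # dominant iff 2*|x| > total.  (Such an entry is unique when it exists.)
--     posiciones = []
--     for fila in matriz:
--         total = sum(abs(x) for x in fila)
--         p = next((j for j, x in enumerate(fila) if 2 * abs(x) > total), -1)
--         if p == -1:
--             return False
--         posiciones.append(p)
--
--     # Duplicate detection with a set instead of a pairwise scan.
--     if len(set(posiciones)) != len(posiciones):
--         return False
--
--     # Same in-place row permutation as the original.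
--     aux = [fila[:] for fila in matriz]
--     b_aux = [fila[:] for fila in terminos_independientes]
--     for i, p in enumerate(posiciones):
--         for j in range(len(aux[i])):
--             matriz[p][j] = aux[i][j]
--         terminos_independientes[p][0] = b_aux[i][0]
--     return True
-- ===== Notes on version B (the rewrite author's own statement) =====
-- stated objective: faster
-- what changed: B computes each row's absolute total once and tests dominance as 2*|entry| > total (one pass per row, first match, justified by uniqueness of a dominant entry) instead of A's per-entry re-summation of the rest of the row, and detects duplicate positions with a set instead of A's quadratic pairwise scan.
import Mathlib
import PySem

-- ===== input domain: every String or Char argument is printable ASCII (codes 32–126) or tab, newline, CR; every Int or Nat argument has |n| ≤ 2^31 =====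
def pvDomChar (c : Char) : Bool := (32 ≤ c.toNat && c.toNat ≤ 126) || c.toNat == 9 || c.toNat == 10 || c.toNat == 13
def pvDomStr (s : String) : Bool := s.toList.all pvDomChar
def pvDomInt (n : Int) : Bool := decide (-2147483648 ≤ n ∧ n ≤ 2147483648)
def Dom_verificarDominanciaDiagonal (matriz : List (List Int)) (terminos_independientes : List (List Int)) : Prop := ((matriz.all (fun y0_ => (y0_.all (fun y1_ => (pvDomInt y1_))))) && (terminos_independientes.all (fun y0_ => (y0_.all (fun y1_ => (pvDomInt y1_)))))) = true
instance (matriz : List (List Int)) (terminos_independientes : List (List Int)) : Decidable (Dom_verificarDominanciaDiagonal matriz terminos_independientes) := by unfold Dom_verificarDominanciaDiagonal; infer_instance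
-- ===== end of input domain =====

-- B replaces A's per-entry O(row) dominance re-summation by one precomputed absolute row
-- total (dominant iff 2|x| > total) and A's quadratic pairwise duplicate scan by a set;
-- A permutes matriz/terminos_independientes in place on the True path — Python B performs
-- the identical mutation, the Lean ports and the theorems concern the RETURN VALUE only.

-- ===== PORT A =====
-- sum of |matriz[i][j]| over j < skip and skip < j < len(matriz[i]) (indices always in
-- range in A, so plain getD is exact here)
def sumatoriaRenglon (matriz : List (List Int)) (i skip : Nat) : Int :=
  let row := matriz.getD i []
  let s1 := (List.range skip).foldl (fun s j => s + |row.getD j 0|) 0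
  (List.range' (skip + 1) (row.length - (skip + 1))).foldl (fun s j => s + |row.getD j 0|) s1

-- the inner j-loop of A: posiciones[i] keeps the LAST dominant column, -1 if none
def rowPosA (matriz : List (List Int)) (i : Nat) : Int :=
  let row := matriz.getD i []
  (List.range row.length).foldl
    (fun acc j => if |row.getD j 0| > sumatoriaRenglon matriz i j then (j : Int) else acc) (-1)

def repeticionLista (lista : List Int) : Bool :=
  (List.range lista.length).any (fun i =>
    (List.range' (i + 1) (lista.length - (i + 1))).any (fun j =>
      lista.getD i 0 == lista.getD j 0))

-- the outer i-loop of A; none = the early 'return False' when posiciones[i] stays -1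
def goA (matriz : List (List Int)) (i : Nat) (acc : List Int) : Option (List Int) :=
  if _h : i < matriz.length then
    if rowPosA matriz i = -1 then none
    else goA matriz (i + 1) (acc ++ [rowPosA matriz i])
  else some acc
termination_by matriz.length - i

-- in-place permutation of matriz / terminos_independientes omitted: return value only
def verificarDominanciaDiagonal (matriz : List (List Int)) (terminos_independientes : List (List Int)) : Bool :=
  match goA matriz 0 [] with
  | none => false
  | some posiciones => if repeticionLista posiciones then false else true

-- ===== PORT B =====
def absTotal (row : List Int) : Int := row.foldl (fun s x => s + |x|) 0

-- first (hence, by uniqueness, only) j with 2*|row[j]| > total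
def firstDomIdx (row : List Int) : Option Nat :=
  let total := absTotal row
  row.findIdx? (fun x => decide (2 * |x| > total))

def goB (rows : List (List Int)) (acc : List Int) : Option (List Int) :=
  match rows with
  | [] => some acc
  | r :: rs =>
    match firstDomIdx r with
    | none => none
    | some p => goB rs (acc ++ [(p : Int)])

-- in-place permutation of matriz / terminos_independientes omitted: return value only
def verificarDominanciaDiagonal_alt (matriz : List (List Int)) (terminos_independientes : List (List Int)) : Bool :=
  match goB matriz [] with
  | none => false
  | some posiciones =>
    if (PySem.Set.ofList posiciones).length ≠ posiciones.length then false else true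

-- ===== PRECONDITION & SPEC =====
-- helper for Pre_ only: the unique dominant column of a row, if any
def preDom (row : List Int) : Option Nat :=
  row.findIdx? (fun x => decide (2 * |x| > (row.map (fun v => |v|)).sum))

def preSafeRow (m ti : List (List Int)) (i : Nat) : Bool :=
  match preDom (m.getD i []) with
  | none => true
  | some p =>
    decide (p < m.length) && decide ((m.getD i []).length ≤ (m.getD p []).length) &&
    decide (p < ti.length) && decide (1 ≤ (ti.getD p []).length) &&
    decide (i < ti.length) && decide (1 ≤ (ti.getD i []).length)

-- Pre_ excludes exactly the inputs on which A RAISES an IndexError: those where every row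
-- has a dominant column, the columns are pairwise distinct, and the final in-place
-- permutation indexes a row of matriz or of terminos_independientes out of range.
def Pre_verificarDominanciaDiagonal (matriz : List (List Int)) (terminos_independientes : List (List Int)) : Prop :=
  (∃ row ∈ matriz, preDom row = none) ∨
  ¬ (matriz.map preDom).Nodup ∨
  (∀ i ∈ List.range matriz.length, preSafeRow matriz terminos_independientes i = true)

instance (matriz : List (List Int)) (terminos_independientes : List (List Int)) : Decidable (Pre_verificarDominanciaDiagonal matriz terminos_independientes) := by unfold Pre_verificarDominanciaDiagonal; infer_instance

def pvWitness_verificarDominanciaDiagonal : List (List Int) × List (List Int) :=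
  ([[4, 1], [1, 4]], [[1], [2]])

def Spec_verificarDominanciaDiagonal (matriz : List (List Int)) (terminos_independientes : List (List Int)) (out : Bool) : Prop := out = verificarDominanciaDiagonal_alt matriz terminos_independientes
instance (matriz : List (List Int)) (terminos_independientes : List (List Int)) (out : Bool) : Decidable (Spec_verificarDominanciaDiagonal matriz terminos_independientes out) := by unfold Spec_verificarDominanciaDiagonal; infer_instance

-- ===== CLAIM (what is proved, stated in full; the proofs are below) =====
def Claim_equal_verificarDominanciaDiagonal : Prop := ∀ (matriz : List (List Int)) (terminos_independientes : List (List Int)), Dom_verificarDominanciaDiagonal matriz terminos_independientes → Pre_verificarDominanciaDiagonal matriz terminos_independientes → Spec_verificarDominanciaDiagonal matriz terminos_independientes (verificarDominanciaDiagonal matriz terminos_independientes)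

-- ===== LEMMAS AND PROOFS =====

-- absTotal is the sum of absolute values
theorem absTotal_eq (row : List Int) : absTotal row = (row.map (fun v => |v|)).sum := by
  simpa [absTotal] using PySem.List.foldl_add row (fun v => |v|) 0

-- a range-indexed absolute sum equals the mapped list sum
theorem range_abs_sum (l : List Int) :
    ((List.range l.length).map (fun j => |l.getD j 0|)).sum = (l.map (fun v => |v|)).sum := by
  induction l with
  | nil => simp
  | cons x xs ih =>
    rw [List.length_cons, List.range_succ_eq_map]
    simp only [List.map_cons, List.map_map, List.sum_cons, List.getD_cons_zero]
    have hmap : (List.range xs.length).map ((fun j => |(x :: xs).getD j 0|) ∘ Nat.succ)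
        = (List.range xs.length).map (fun j => |xs.getD j 0|) :=
      List.map_congr_left (fun j _ => by simp)
    rw [hmap, ih]

-- sumatoriaRenglon skips exactly the skipped entry
theorem sumatoria_eq (matriz : List (List Int)) (i skip : Nat)
    (h : skip < (matriz.getD i []).length) :
    sumatoriaRenglon matriz i skip
      = ((matriz.getD i []).map (fun v => |v|)).sum - |(matriz.getD i []).getD skip 0| := by
  set row := matriz.getD i [] with hrow
  have h1 := PySem.List.foldl_add (List.range skip) (fun j => |row.getD j 0|) 0
  have h2 := PySem.List.foldl_add (List.range' (skip + 1) (row.length - (skip + 1)))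
      (fun j => |row.getD j 0|)
      ((List.range skip).foldl (fun s j => s + |row.getD j 0|) 0)
  have hsplit : (List.range (skip + 1)) ++ List.range' (skip + 1) (row.length - (skip + 1))
      = List.range row.length := by
    have h3 : List.range' 0 (skip + 1) 1 ++ List.range' (0 + 1 * (skip + 1)) (row.length - (skip + 1)) 1
        = List.range' 0 ((skip + 1) + (row.length - (skip + 1))) 1 :=
      @List.range'_append 0 (skip + 1) (row.length - (skip + 1)) 1
    rw [List.range_eq_range', List.range_eq_range']
    simpa [Nat.add_sub_cancel' h] using h3
  have hsum : ((List.range skip).map (fun j => |row.getD j 0|)).sum + |row.getD skip 0|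
      + ((List.range' (skip + 1) (row.length - (skip + 1))).map (fun j => |row.getD j 0|)).sum
      = (row.map (fun v => |v|)).sum := by
    rw [← range_abs_sum row, ← hsplit]
    rw [List.map_append, List.sum_append, List.range_succ, List.map_append, List.sum_append]
    simp only [List.map_cons, List.map_nil, List.sum_cons, List.sum_nil]
    ring
  show (List.range' (skip + 1) (row.length - (skip + 1))).foldl (fun s j => s + |row.getD j 0|)
      ((List.range skip).foldl (fun s j => s + |row.getD j 0|) 0) =
    (row.map (fun v => |v|)).sum - |row.getD skip 0|
  rw [h2, h1]
  omega

-- any two columns' absolute values together are at most the row's absolute total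
theorem pair_le_total (l : List Int) (j k : Nat) (hj : j < l.length) (hk : k < l.length)
    (hjk : j ≠ k) : |l.getD j 0| + |l.getD k 0| ≤ (l.map (fun v => |v|)).sum := by
  have hfin : ((List.range l.length).map (fun j => |l.getD j 0|)).sum
      = ∑ i ∈ Finset.range l.length, |l.getD i 0| := rfl
  have hsub : ({j, k} : Finset ℕ) ⊆ Finset.range l.length := by
    intro x hx
    simp only [Finset.mem_insert, Finset.mem_singleton] at hx
    rcases hx with rfl | rfl <;> simp [Finset.mem_range, hj, hk]
  have hpair : ∑ i ∈ ({j, k} : Finset ℕ), |l.getD i 0| = |l.getD j 0| + |l.getD k 0| :=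
    Finset.sum_pair hjk
  have hle : ∑ i ∈ ({j, k} : Finset ℕ), |l.getD i 0| ≤ ∑ i ∈ Finset.range l.length, |l.getD i 0| :=
    Finset.sum_le_sum_of_subset_of_nonneg hsub (fun i _ _ => abs_nonneg _)
  rw [hpair] at hle
  rw [← range_abs_sum l, hfin]
  exact hle

-- A's last-match fold over range, when no index matches
theorem foldl_range_if_none (Q : Nat → Bool) (n : Nat) (h : ∀ j < n, Q j = false) :
    (List.range n).foldl (fun acc j => if Q j then (j : Int) else acc) (-1) = -1 := by
  induction n with
  | zero => simp
  | succ m ih =>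
    rw [List.range_succ, List.foldl_append]
    simp only [List.foldl_cons, List.foldl_nil, h m (by omega), Bool.false_eq_true, if_false]
    exact ih (fun j hj => h j (by omega))

-- A's last-match fold over range, when a unique index matches
theorem foldl_range_if_unique (Q : Nat → Bool) (n j0 : Nat) (hj0 : j0 < n)
    (hQ : Q j0 = true) (huniq : ∀ j < n, Q j = true → j = j0) :
    (List.range n).foldl (fun acc j => if Q j then (j : Int) else acc) (-1) = (j0 : Int) := by
  induction n with
  | zero => omega
  | succ m ih =>
    rw [List.range_succ, List.foldl_append]
    simp only [List.foldl_cons, List.foldl_nil]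
    by_cases hm : m = j0
    · subst hm; simp [hQ]
    · have hQm : Q m = false := by
        cases hqm : Q m
        · rfl
        · exact absurd (huniq m (by omega) hqm) hm
      simp only [hQm, Bool.false_eq_true, if_false]
      exact ih (by omega) (fun j hj hq => huniq j (by omega) hq)

-- A's inner loop computes exactly B's unique dominant column (or -1)
theorem rowPosA_eq (matriz : List (List Int)) (i : Nat) :
    rowPosA matriz i = match firstDomIdx (matriz.getD i []) with
      | none => -1
      | some p => (p : Int) := by
  set row := matriz.getD i [] with hrow
  set T := (row.map (fun v => |v|)).sum with hT
  set Q : Nat → Bool := fun j => decide (2 * |row.getD j 0| > T) with hQ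
  have hfold : rowPosA matriz i
      = (List.range row.length).foldl (fun acc j => if Q j then (j : Int) else acc) (-1) := by
    unfold rowPosA
    rw [← hrow]
    apply PySem.List.foldl_congr_mem
    intro acc j hj
    have hjlt : j < row.length := List.mem_range.mp hj
    rw [sumatoria_eq matriz i j (by simpa [← hrow] using hjlt)]
    rw [← hrow, ← hT, hQ]
    by_cases hc : 2 * |row.getD j 0| > T
    · rw [if_pos (by omega), if_pos (by simpa using hc)]
    · rw [if_neg (by omega), if_neg (by simpa using hc)]
  have hpred : firstDomIdx row = row.findIdx? (fun x => decide (2 * |x| > T)) := by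
    simp only [firstDomIdx, absTotal_eq, ← hT]
  cases hf : firstDomIdx row with
  | none =>
    rw [hpred] at hf
    rw [hfold]
    apply foldl_range_if_none
    intro j hj
    have := List.findIdx?_eq_none_iff.mp hf (row.getD j 0)
        (by rw [List.getD_eq_getElem row 0 hj]; exact List.getElem_mem hj)
    simpa [hQ] using this
  | some p =>
    rw [hpred] at hf
    obtain ⟨hp, hQp, _⟩ := List.findIdx?_eq_some_iff_getElem.mp hf
    rw [hfold]
    apply foldl_range_if_unique Q row.length p hp
    · simp only [hQ, List.getD_eq_getElem row 0 hp]
      exact hQp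
    · intro j hj hqj
      by_contra hne
      have hQp' : 2 * |row.getD p 0| > T := by
        have := hQp
        rw [← List.getD_eq_getElem row 0 hp] at this
        simpa using this
      have hqj' : 2 * |row.getD j 0| > T := by simpa [hQ] using hqj
      have := pair_le_total row j p hj hp hne
      rw [← hT] at this
      omega

-- A's outer loop equals B's structural recursion over the rows
theorem goA_eq_goB (matriz : List (List Int)) :
    ∀ (k i : Nat) (acc : List Int), matriz.length - i ≤ k →
      goA matriz i acc = goB (matriz.drop i) acc := by
  intro k
  induction k with
  | zero =>
    intro i acc h
    have hge : matriz.length ≤ i := by omega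
    rw [goA, dif_neg (by omega), List.drop_eq_nil_of_le hge]
    rfl
  | succ k ih =>
    intro i acc h
    by_cases hi : i < matriz.length
    · have hdrop : matriz.drop i = matriz.getD i [] :: matriz.drop (i + 1) := by
        rw [List.getD_eq_getElem matriz [] hi]
        exact List.drop_eq_getElem_cons hi
      rw [goA, dif_pos hi, hdrop, rowPosA_eq]
      cases hf : firstDomIdx (matriz.getD i []) with
      | none =>
        simp only [goB, hf]
        rfl
      | some p =>
        have hred : (match (some p : Option Nat) with
            | none => (-1 : Int) | some q => (q : Int)) = (p : Int) := rfl
        rw [hred, if_neg (show ¬((p : Int) = -1) by omega)]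
        simp only [goB, hf]
        exact ih (i + 1) (acc ++ [(p : Int)]) (by omega)
    · rw [goA, dif_neg hi, List.drop_eq_nil_of_le (by omega)]
      rfl

-- A's pairwise scan detects exactly a duplicate
theorem repeticion_iff (l : List Int) : repeticionLista l = true ↔ ¬ l.Nodup := by
  simp only [repeticionLista, List.any_eq_true, List.mem_range, List.mem_range'_1, beq_iff_eq]
  rw [List.nodup_iff_getElem?_ne_getElem?]
  push Not
  constructor
  · rintro ⟨i, hi, j, ⟨hij, hjn⟩, heq⟩
    have hjl : j < l.length := by omega
    refine ⟨i, j, by omega, hjl, ?_⟩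
    rw [List.getElem?_eq_getElem hjl, List.getElem?_eq_getElem (by omega : i < l.length)]
    rw [← List.getD_eq_getElem l 0 hjl, ← List.getD_eq_getElem l 0 (by omega : i < l.length)]
    exact congrArg some heq
  · rintro ⟨i, j, hij, hjl, heq⟩
    refine ⟨i, by omega, j, ⟨by omega, by omega⟩, ?_⟩
    rw [List.getElem?_eq_getElem hjl, List.getElem?_eq_getElem (by omega : i < l.length)] at heq
    rw [List.getD_eq_getElem l 0 hjl, List.getD_eq_getElem l 0 (by omega : i < l.length)]
    exact Option.some.inj heq

-- len(set(l)) == len(l) characterises Nodup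
theorem setLen_iff (l : List Int) : (PySem.Set.ofList l).length = l.length ↔ l.Nodup := by
  constructor
  · intro h
    have hded : l.dedup.length = l.length := by
      have h1 : (PySem.Set.ofList l).toFinset = l.toFinset := by
        ext x
        simp [List.mem_toFinset, PySem.Set.mem_ofList]
      have h2 : (PySem.Set.ofList l).toFinset.card = (PySem.Set.ofList l).length :=
        List.toFinset_card_of_nodup (PySem.Set.nodup_ofList l)
      have h3 := List.card_toFinset l
      rw [h1, h3] at h2
      omega
    have : l.dedup = l := (l.dedup_sublist).eq_of_length hded
    rw [← this]
    exact l.nodup_dedup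
  · intro h
    rw [PySem.Set.ofList_eq_self_of_nodup l h]

theorem main_eq (matriz terminos_independientes : List (List Int)) :
    verificarDominanciaDiagonal matriz terminos_independientes
      = verificarDominanciaDiagonal_alt matriz terminos_independientes := by
  unfold verificarDominanciaDiagonal verificarDominanciaDiagonal_alt
  have h0 : goA matriz 0 [] = goB matriz [] := by
    simpa using goA_eq_goB matriz matriz.length 0 [] (by omega)
  rw [h0]
  cases goB matriz [] with
  | none => rfl
  | some pos =>
    simp only []
    by_cases h : pos.Nodup
    · rw [if_neg, if_neg]
      · simp [setLen_iff pos, h]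
      · simp [repeticion_iff pos, h]
    · rw [if_pos, if_pos]
      · simp [setLen_iff pos, h]
      · simp [repeticion_iff pos, h]

-- ===== VERDICT (by name: the statement is the Claim_ definition above) =====
theorem verificarDominanciaDiagonal_spec : Claim_equal_verificarDominanciaDiagonal := by
  intro matriz ti _ _
  unfold Spec_verificarDominanciaDiagonal
  exact main_eq matriz ti
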